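-- pv_equiv track=rewrite | github.com/ALC-Study-Unlimited/User-Portal | create_css_aliases_v2.py | generate_alias_css
-- ===== SOURCE A (Python) =====
-- def generate_alias_css(alias_map):
--     """エイリアスCSSを生成"""
--     css_lines = [
--         "/* ================================= */",
--         "/* CSS Variable Aliases for Better Maintainability */",
--         "/* Generated to simplify long Webflow variable names */",
--         "/* Original values are preserved - these are just references */",
--         "/* ================================= */",
--         "",
--         ":root {"
--     ]
--
--     # カテゴリごとにグループ化
--     categories = {
--         'container': [],
--         'spacing': [],
--         'color': [],
--         'text': [],
--         'background': [],
--         'border': [],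
--         'button': [],
--         'card': [],
--         'input': [],
--         'typography': [],
--         'section': [],
--         'gap': [],
--         'radius': [],
--         'tag': [],
--         'other': []
--     }
--
--     for long_name, short_name in sorted(alias_map.items(), key=lambda x: x[1]):
--         category = 'other'
--         short_clean = short_name.replace('--', '')
--
--         # カテゴリ判定
--         if 'container' in short_clean:
--             category = 'container'
--         elif 'section' in short_clean:
--             category = 'section'
--         elif 'spacing' in short_clean or 'padding' in short_clean or 'margin' in short_clean:
--             category = 'spacing'
--         elif 'gap' in short_clean:
--             category = 'gap'
--         elif 'radius' in short_clean:
--             category = 'radius'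
--         elif 'color' in short_clean or 'neutral' in short_clean or 'accent' in short_clean or 'tint' in short_clean:
--             category = 'color'
--         elif 'text' in short_clean or 'font' in short_clean:
--             category = 'text'
--         elif 'bg-' in short_clean or 'background' in short_clean:
--             category = 'background'
--         elif 'border' in short_clean:
--             category = 'border'
--         elif 'button' in short_clean or 'btn' in short_clean:
--             category = 'button'
--         elif 'card' in short_clean:
--             category = 'card'
--         elif 'input' in short_clean:
--             category = 'input'
--         elif 'typography' in short_clean or 'heading' in short_clean or 'eyebrow' in short_clean or 'h0' in short_clean or 'h1' in short_clean or 'h2' in short_clean or 'h3' in short_clean or 'h4' in short_clean or 'h5' in short_clean or 'h6' in short_clean: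
--             category = 'typography'
--         elif 'tag' in short_clean:
--             category = 'tag'
--
--         categories[category].append((long_name, short_name))
--
--     # カテゴリごとに出力
--     for category, items in categories.items():
--         if items:
--             css_lines.append(f"  /* {category.title()} Variables */")
--             for long_name, short_name in items:
--                 css_lines.append(f"  {short_name}: var({long_name});")
--             css_lines.append("")
--
--     css_lines.append("}")
--     css_lines.append("")
--
--     return '\n'.join(css_lines)
-- ===== SOURCE B (Python) =====
-- # B: data-driven re-implementation — the elif chain becomes a first-match rule
-- # table and the per-category buckets become one filtered pass per category.
--
-- _RULES = [
--     ('container', ('container',)),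
--     ('section', ('section',)),
--     ('spacing', ('spacing', 'padding', 'margin')),
--     ('gap', ('gap',)),
--     ('radius', ('radius',)),
--     ('color', ('color', 'neutral', 'accent', 'tint')),
--     ('text', ('text', 'font')),
--     ('background', ('bg-', 'background')),
--     ('border', ('border',)),
--     ('button', ('button', 'btn')),
--     ('card', ('card',)),
--     ('input', ('input',)),
--     ('typography', ('typography', 'heading', 'eyebrow', 'h0', 'h1', 'h2',
--                     'h3', 'h4', 'h5', 'h6')),
--     ('tag', ('tag',)),
-- ]
--
-- _ORDER = ['container', 'spacing', 'color', 'text', 'background', 'border',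
--           'button', 'card', 'input', 'typography', 'section', 'gap',
--           'radius', 'tag', 'other']
--
--
-- def _category(short_name):
--     s = short_name.replace('--', '')
--     for cat, needles in _RULES:
--         if any(n in s for n in needles):
--             return cat
--     return 'other'
--
--
-- def generate_alias_css(alias_map):
--     items = sorted(alias_map.items(), key=lambda x: x[1])
--     tagged = [(_category(short), long, short) for long, short in items]
--     parts = [
--         "/* ================================= */",
--         "/* CSS Variable Aliases for Better Maintainability */",
--         "/* Generated to simplify long Webflow variable names */",
--         "/* Original values are preserved - these are just references */",
--         "/* ================================= */",
--         "",
--         ":root {",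
--     ]
--     for cat in _ORDER:
--         group = [f"  {short}: var({long});"
--                  for c, long, short in tagged if c == cat]
--         if group:
--             parts.append(f"  /* {cat.title()} Variables */")
--             parts.extend(group)
--             parts.append("")
--     parts.append("}")
--     parts.append("")
--     return '\n'.join(parts)
-- ===== Notes on version B (the rewrite author's own statement) =====
-- stated objective: alternative
-- what changed: Replaces A's hard-coded 15-way elif chain and mutable per-category dict of buckets by a data-driven first-match rule table and one filtered pass per output category.
import Mathlib
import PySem

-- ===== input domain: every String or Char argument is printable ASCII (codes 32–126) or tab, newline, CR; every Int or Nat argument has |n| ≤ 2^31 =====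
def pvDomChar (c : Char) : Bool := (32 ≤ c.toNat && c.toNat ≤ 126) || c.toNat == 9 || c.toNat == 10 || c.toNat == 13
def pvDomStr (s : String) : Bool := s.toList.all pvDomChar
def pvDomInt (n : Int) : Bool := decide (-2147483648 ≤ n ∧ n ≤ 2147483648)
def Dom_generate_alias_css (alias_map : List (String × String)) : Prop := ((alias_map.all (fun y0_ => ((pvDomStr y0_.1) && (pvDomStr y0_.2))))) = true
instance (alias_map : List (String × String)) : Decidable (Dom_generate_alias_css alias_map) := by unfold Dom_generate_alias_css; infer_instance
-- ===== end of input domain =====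

-- B replaces A's 15-way elif chain and mutable per-category dict by a data-driven
-- first-match rule table and one filtered pass per category (objective: alternative
-- decomposition, same cost).

-- shared helpers: hand ports of the f-strings and of str.title() (title is exact for
-- ASCII where "cased" = isAlpha, which covers the whole printable-ASCII domain)
def pvTitleChars : Bool → List Char → List Char
  | _, [] => []
  | prevAlpha, c :: cs =>
    (if c.isAlpha then (if prevAlpha then c.toLower else c.toUpper) else c)
      :: pvTitleChars c.isAlpha cs

def pvTitle (s : String) : String := String.ofList (pvTitleChars false s.toList)

def pvLine (p : String × String) : String := "  " ++ p.2 ++ ": var(" ++ p.1 ++ ");"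

def pvHeader (cat : String) : String := "  /* " ++ pvTitle cat ++ " Variables */"

def pvHeaderLines : List String :=
  ["/* ================================= */",
   "/* CSS Variable Aliases for Better Maintainability */",
   "/* Generated to simplify long Webflow variable names */",
   "/* Original values are preserved - these are just references */",
   "/* ================================= */",
   "",
   ":root {"]

-- ===== PORT A =====
-- A's elif chain, condition for condition (or-chains left-associated as Python parses them)
def pvClean (s : String) : String := PySem.Str.replace s "--" ""

def pvCatA (short_name : String) : String :=
  let sc := pvClean short_name
  if PySem.Str.isIn "container" sc then "container"
  else if PySem.Str.isIn "section" sc then "section"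
  else if (PySem.Str.isIn "spacing" sc || PySem.Str.isIn "padding" sc) || PySem.Str.isIn "margin" sc then "spacing"
  else if PySem.Str.isIn "gap" sc then "gap"
  else if PySem.Str.isIn "radius" sc then "radius"
  else if ((PySem.Str.isIn "color" sc || PySem.Str.isIn "neutral" sc) || PySem.Str.isIn "accent" sc) || PySem.Str.isIn "tint" sc then "color"
  else if PySem.Str.isIn "text" sc || PySem.Str.isIn "font" sc then "text"
  else if PySem.Str.isIn "bg-" sc || PySem.Str.isIn "background" sc then "background"
  else if PySem.Str.isIn "border" sc then "border"
  else if PySem.Str.isIn "button" sc || PySem.Str.isIn "btn" sc then "button"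
  else if PySem.Str.isIn "card" sc then "card"
  else if PySem.Str.isIn "input" sc then "input"
  else if ((((((((PySem.Str.isIn "typography" sc || PySem.Str.isIn "heading" sc) || PySem.Str.isIn "eyebrow" sc) || PySem.Str.isIn "h0" sc) || PySem.Str.isIn "h1" sc) || PySem.Str.isIn "h2" sc) || PySem.Str.isIn "h3" sc) || PySem.Str.isIn "h4" sc) || PySem.Str.isIn "h5" sc) || PySem.Str.isIn "h6" sc then "typography"
  else if PySem.Str.isIn "tag" sc then "tag"
  else "other"

-- the categories dict with its 15 empty buckets, in A's insertion order
def pvCategories0 : PySem.Dict String (List (String × String)) :=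
  ((((((((((((((PySem.Dict.empty.insert "container" []).insert "spacing" []).insert
    "color" []).insert "text" []).insert "background" []).insert "border" []).insert
    "button" []).insert "card" []).insert "input" []).insert "typography" []).insert
    "section" []).insert "gap" []).insert "radius" []).insert "tag" []).insert "other" []

def generate_alias_css (alias_map : List (String × String)) : String :=
  let css_lines := pvHeaderLines
  let categories := (PySem.List.sorted (PySem.Dict.ofList alias_map).items (fun x => x.2) false).foldl
    (fun d p => d.modify (pvCatA p.2) [] (· ++ [p])) pvCategories0
  let css_lines := categories.items.foldl (fun acc ci =>
      if ci.2 = [] then acc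
      else (ci.2.foldl (fun a p => a ++ [pvLine p]) (acc ++ [pvHeader ci.1])) ++ [""]) css_lines
  let css_lines := (css_lines ++ ["}"]) ++ [""]
  PySem.Str.join "\n" css_lines

-- ===== PORT B =====
def pvRules : List (String × List String) :=
  [("container", ["container"]),
   ("section", ["section"]),
   ("spacing", ["spacing", "padding", "margin"]),
   ("gap", ["gap"]),
   ("radius", ["radius"]),
   ("color", ["color", "neutral", "accent", "tint"]),
   ("text", ["text", "font"]),
   ("background", ["bg-", "background"]),
   ("border", ["border"]),
   ("button", ["button", "btn"]),
   ("card", ["card"]),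
   ("input", ["input"]),
   ("typography", ["typography", "heading", "eyebrow", "h0", "h1", "h2", "h3", "h4", "h5", "h6"]),
   ("tag", ["tag"])]

def pvOrder : List String :=
  ["container", "spacing", "color", "text", "background", "border", "button",
   "card", "input", "typography", "section", "gap", "radius", "tag", "other"]

def pvCatB (short_name : String) : String :=
  let s := pvClean short_name
  match pvRules.find? (fun r => r.2.any (fun n => PySem.Str.isIn n s)) with
  | some r => r.1
  | none => "other"

def generate_alias_css_alt (alias_map : List (String × String)) : String :=
  let items := PySem.List.sorted (PySem.Dict.ofList alias_map).items (fun x => x.2) false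
  let tagged := items.map (fun p => (pvCatB p.2, p.1, p.2))
  let parts := pvHeaderLines
  let parts := pvOrder.foldl (fun acc cat =>
      let group := (tagged.filter (fun t => t.1 == cat)).map
        (fun t => "  " ++ t.2.2 ++ ": var(" ++ t.2.1 ++ ");")
      if group = [] then acc
      else ((acc ++ [pvHeader cat]) ++ group) ++ [""]) parts
  let parts := (parts ++ ["}"]) ++ [""]
  PySem.Str.join "\n" parts

-- ===== PRECONDITION & SPEC =====
def Spec_generate_alias_css (alias_map : List (String × String)) (out : String) : Prop := out = generate_alias_css_alt alias_map
instance (alias_map : List (String × String)) (out : String) : Decidable (Spec_generate_alias_css alias_map out) := by unfold Spec_generate_alias_css; infer_instance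

-- ===== CLAIM (what is proved, stated in full; the proofs are below) =====
def Claim_equal_generate_alias_css : Prop := ∀ (alias_map : List (String × String)), Dom_generate_alias_css alias_map → Spec_generate_alias_css alias_map (generate_alias_css alias_map)

-- ===== LEMMAS AND PROOFS =====

-- B's rule-table lookup decides exactly A's elif chain (case split on each substring test)
theorem pvCat_eq (s : String) : pvCatB s = pvCatA s := by
  simp only [pvCatB, pvCatA, pvRules, List.find?, List.any, Bool.or_false, Bool.or_assoc]
  cases h0 : PySem.Str.isIn "container" (pvClean s) <;>
    simp only [h0, Bool.false_eq_true, if_false, if_true, Bool.false_or, Bool.true_or]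
  cases h1 : PySem.Str.isIn "section" (pvClean s) <;>
    simp only [h1, Bool.false_eq_true, if_false, if_true, Bool.false_or, Bool.true_or]
  cases h2 : PySem.Str.isIn "spacing" (pvClean s) <;>
    simp only [h2, Bool.false_eq_true, if_false, if_true, Bool.false_or, Bool.true_or]
  cases h3 : PySem.Str.isIn "padding" (pvClean s) <;>
    simp only [h3, Bool.false_eq_true, if_false, if_true, Bool.false_or, Bool.true_or]
  cases h4 : PySem.Str.isIn "margin" (pvClean s) <;>
    simp only [h4, Bool.false_eq_true, if_false, if_true, Bool.false_or, Bool.true_or]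
  cases h5 : PySem.Str.isIn "gap" (pvClean s) <;>
    simp only [h5, Bool.false_eq_true, if_false, if_true, Bool.false_or, Bool.true_or]
  cases h6 : PySem.Str.isIn "radius" (pvClean s) <;>
    simp only [h6, Bool.false_eq_true, if_false, if_true, Bool.false_or, Bool.true_or]
  cases h7 : PySem.Str.isIn "color" (pvClean s) <;>
    simp only [h7, Bool.false_eq_true, if_false, if_true, Bool.false_or, Bool.true_or]
  cases h8 : PySem.Str.isIn "neutral" (pvClean s) <;>
    simp only [h8, Bool.false_eq_true, if_false, if_true, Bool.false_or, Bool.true_or]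
  cases h9 : PySem.Str.isIn "accent" (pvClean s) <;>
    simp only [h9, Bool.false_eq_true, if_false, if_true, Bool.false_or, Bool.true_or]
  cases h10 : PySem.Str.isIn "tint" (pvClean s) <;>
    simp only [h10, Bool.false_eq_true, if_false, if_true, Bool.false_or, Bool.true_or]
  cases h11 : PySem.Str.isIn "text" (pvClean s) <;>
    simp only [h11, Bool.false_eq_true, if_false, if_true, Bool.false_or, Bool.true_or]
  cases h12 : PySem.Str.isIn "font" (pvClean s) <;>
    simp only [h12, Bool.false_eq_true, if_false, if_true, Bool.false_or, Bool.true_or]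
  cases h13 : PySem.Str.isIn "bg-" (pvClean s) <;>
    simp only [h13, Bool.false_eq_true, if_false, if_true, Bool.false_or, Bool.true_or]
  cases h14 : PySem.Str.isIn "background" (pvClean s) <;>
    simp only [h14, Bool.false_eq_true, if_false, if_true, Bool.false_or, Bool.true_or]
  cases h15 : PySem.Str.isIn "border" (pvClean s) <;>
    simp only [h15, Bool.false_eq_true, if_false, if_true, Bool.false_or, Bool.true_or]
  cases h16 : PySem.Str.isIn "button" (pvClean s) <;>
    simp only [h16, Bool.false_eq_true, if_false, if_true, Bool.false_or, Bool.true_or]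
  cases h17 : PySem.Str.isIn "btn" (pvClean s) <;>
    simp only [h17, Bool.false_eq_true, if_false, if_true, Bool.false_or, Bool.true_or]
  cases h18 : PySem.Str.isIn "card" (pvClean s) <;>
    simp only [h18, Bool.false_eq_true, if_false, if_true, Bool.false_or, Bool.true_or]
  cases h19 : PySem.Str.isIn "input" (pvClean s) <;>
    simp only [h19, Bool.false_eq_true, if_false, if_true, Bool.false_or, Bool.true_or]
  cases h20 : PySem.Str.isIn "typography" (pvClean s) <;>
    simp only [h20, Bool.false_eq_true, if_false, if_true, Bool.false_or, Bool.true_or]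
  cases h21 : PySem.Str.isIn "heading" (pvClean s) <;>
    simp only [h21, Bool.false_eq_true, if_false, if_true, Bool.false_or, Bool.true_or]
  cases h22 : PySem.Str.isIn "eyebrow" (pvClean s) <;>
    simp only [h22, Bool.false_eq_true, if_false, if_true, Bool.false_or, Bool.true_or]
  cases h23 : PySem.Str.isIn "h0" (pvClean s) <;>
    simp only [h23, Bool.false_eq_true, if_false, if_true, Bool.false_or, Bool.true_or]
  cases h24 : PySem.Str.isIn "h1" (pvClean s) <;>
    simp only [h24, Bool.false_eq_true, if_false, if_true, Bool.false_or, Bool.true_or]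
  cases h25 : PySem.Str.isIn "h2" (pvClean s) <;>
    simp only [h25, Bool.false_eq_true, if_false, if_true, Bool.false_or, Bool.true_or]
  cases h26 : PySem.Str.isIn "h3" (pvClean s) <;>
    simp only [h26, Bool.false_eq_true, if_false, if_true, Bool.false_or, Bool.true_or]
  cases h27 : PySem.Str.isIn "h4" (pvClean s) <;>
    simp only [h27, Bool.false_eq_true, if_false, if_true, Bool.false_or, Bool.true_or]
  cases h28 : PySem.Str.isIn "h5" (pvClean s) <;>
    simp only [h28, Bool.false_eq_true, if_false, if_true, Bool.false_or, Bool.true_or]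
  cases h29 : PySem.Str.isIn "h6" (pvClean s) <;>
    simp only [h29, Bool.false_eq_true, if_false, if_true, Bool.false_or, Bool.true_or]
  cases h30 : PySem.Str.isIn "tag" (pvClean s) <;>
    simp only [h30, Bool.false_eq_true, if_false, if_true, Bool.false_or, Bool.true_or]

theorem pvCatB_mem (s : String) : pvCatB s ∈ pvOrder := by
  simp only [pvCatB]
  rcases hf : List.find? (fun r => r.2.any fun n => PySem.Str.isIn n (pvClean s)) pvRules with _ | r
  · simp only [hf]; decide
  · have hr := List.mem_of_find?_eq_some hf
    simp only [hf]
    simp only [pvRules, List.mem_cons, List.not_mem_nil, or_false] at hr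
    rcases hr with h|h|h|h|h|h|h|h|h|h|h|h|h|h <;> subst h <;> decide

theorem pvCatA_mem (s : String) : pvCatA s ∈ pvOrder := pvCat_eq s ▸ pvCatB_mem s

theorem pvSet_update_of_subset {s : List String} : ∀ (xs : List String),
    (∀ x ∈ xs, x ∈ s) → PySem.Set.update s xs = s := by
  intro xs
  induction xs generalizing s with
  | nil => intro _; rfl
  | cons x xs ih =>
    intro h
    have hx : PySem.Set.add s x = s := by
      simp [PySem.Set.add, PySem.Set.contains, h x (by simp)]
    calc PySem.Set.update s (x :: xs) = PySem.Set.update (PySem.Set.add s x) xs := rfl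
      _ = PySem.Set.update s xs := by rw [hx]
      _ = s := ih (fun y hy => h y (by simp [hy]))

theorem pvItems_eq_keys_map (d : PySem.Dict String (List (String × String)))
    (h : d.keys.Nodup) : d.items = d.keys.map (fun k => (k, d.getD k [])) := by
  have h1 : d.items.map (fun kv => (kv.1, d.getD kv.1 [])) = d.items.map id := by
    apply List.map_congr_left
    intro a ha
    have := PySem.Dict.getD_of_mem_items d (k := a.1) (v := a.2) (by simpa using ha) h []
    simp [this]
  have h2 : d.keys = d.items.map (fun kv => kv.1) := by
    simp [PySem.Dict.keys]
  rw [h2, List.map_map]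
  calc d.items = d.items.map id := by simp
    _ = d.items.map (fun kv => (kv.1, d.getD kv.1 [])) := h1.symm
    _ = _ := by rfl

-- proof-only helpers: the lines each version emits for one category
def pvBlockA (ci : String × List (String × String)) : List String :=
  if ci.2 = [] then [] else ([pvHeader ci.1] ++ ci.2.map pvLine) ++ [""]

def pvGroupB (items : List (String × String)) (cat : String) : List String :=
  ((items.map (fun p => (pvCatB p.2, p.1, p.2))).filter (fun t => t.1 == cat)).map
    (fun t => "  " ++ t.2.2 ++ ": var(" ++ t.2.1 ++ ");")

def pvBlockB (items : List (String × String)) (cat : String) : List String :=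
  if pvGroupB items cat = [] then []
  else ([pvHeader cat] ++ pvGroupB items cat) ++ [""]

theorem pvKeys0 : pvCategories0.keys = pvOrder := by decide

theorem pv_hA (d : PySem.Dict String (List (String × String))) :
    d.items.foldl (fun acc ci => if ci.2 = [] then acc
      else (ci.2.foldl (fun a p => a ++ [pvLine p]) (acc ++ [pvHeader ci.1])) ++ [""]) pvHeaderLines
    = pvHeaderLines ++ d.items.flatMap pvBlockA := by
  rw [PySem.List.foldl_congr_mem _ _ (fun acc ci => acc ++ pvBlockA ci) _ ?_]
  · exact PySem.List.foldl_append_eq_flatMap _ _ _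
  · intro acc ci _
    by_cases h : ci.2 = []
    · simp [pvBlockA, h]
    · rw [PySem.List.foldl_append_singleton_eq_map]
      simp [pvBlockA, h]

theorem pv_hB (L : List (String × String)) :
    pvOrder.foldl (fun acc cat =>
      let group := ((L.map (fun p => (pvCatB p.2, p.1, p.2))).filter (fun t => t.1 == cat)).map
        (fun t => "  " ++ t.2.2 ++ ": var(" ++ t.2.1 ++ ");")
      if group = [] then acc else ((acc ++ [pvHeader cat]) ++ group) ++ [""]) pvHeaderLines
    = pvHeaderLines ++ pvOrder.flatMap (pvBlockB L) := by
  rw [PySem.List.foldl_congr_mem _ _ (fun acc cat => acc ++ pvBlockB L cat) _ ?_]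
  · exact PySem.List.foldl_append_eq_flatMap _ _ _
  · intro acc cat _
    simp only [pvBlockB, pvGroupB]
    by_cases h : ((L.map (fun p => (pvCatB p.2, p.1, p.2))).filter (fun t => t.1 == cat)).map
        (fun t => "  " ++ t.2.2 ++ ": var(" ++ t.2.1 ++ ");") = []
    · simp [h]
    · simp [h]

-- ===== VERDICT (by name: the statement is the Claim_ definition above) =====
theorem generate_alias_css_spec : Claim_equal_generate_alias_css := by
  intro am _
  unfold Spec_generate_alias_css
  simp only [generate_alias_css, generate_alias_css_alt]
  set L := PySem.List.sorted (PySem.Dict.ofList am).items (fun x => x.2) false with hL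
  set cats := L.foldl (fun d p => d.modify (pvCatA p.2) [] (· ++ [p])) pvCategories0 with hcats
  have hkeys : cats.keys = pvOrder := by
    rw [hcats, PySem.Dict.keys_foldl_modify_key L (fun p => pvCatA p.2) [] (fun _ p v => v ++ [p])
        pvCategories0, pvKeys0]
    exact pvSet_update_of_subset _ (by
      intro x hx
      rcases List.mem_map.1 hx with ⟨p, _, rfl⟩
      exact pvCatA_mem _)
  have hnodup : cats.keys.Nodup := by rw [hkeys]; decide
  have h0 : ∀ c ∈ pvOrder, pvCategories0.getD c [] = [] := by decide
  have hgetD : ∀ c ∈ pvOrder, cats.getD c [] = L.filter (fun p => pvCatA p.2 == c) := by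
    intro c hc
    rw [hcats, ← List.foldl_map (f := fun p : String × String => ((pvCatA p.2 : String), p))
        (g := fun (d : PySem.Dict String (List (String × String))) q => d.modify q.1 [] (· ++ [q.2])),
      PySem.Dict.getD_foldl_modify_append, h0 c hc]
    simp [List.filter_map, List.map_map, Function.comp_def]
  have hitems : cats.items = pvOrder.map (fun k => (k, cats.getD k [])) := by
    rw [pvItems_eq_keys_map cats hnodup, hkeys]
  rw [pv_hA cats, pv_hB L, hitems, List.flatMap_map]
  have hblock : ∀ c ∈ pvOrder, pvBlockA (c, cats.getD c []) = pvBlockB L c := by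
    intro c hc
    have hgrp : pvGroupB L c = (L.filter (fun p => pvCatA p.2 == c)).map pvLine := by
      rw [pvGroupB, List.filter_map]
      simp [List.map_map, Function.comp_def, pvLine, pvCat_eq]
    simp only [pvBlockA, pvBlockB, hgetD c hc, hgrp]
    by_cases h : L.filter (fun p => pvCatA p.2 == c) = []
    · simp [h]
    · simp [h]
  have hflat : pvOrder.flatMap (fun k => pvBlockA (k, cats.getD k [])) = pvOrder.flatMap (pvBlockB L) := by
    simp only [List.flatMap_def]
    rw [List.map_congr_left hblock]
  rw [hflat]
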